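-- pv_equiv track=rewrite | github.com/kirtan226/python-practice-programs | spoge_case.py | is_spongecase
-- ===== SOURCE A (Python) =====
-- def is_spongecase(s):
--     new = list(s)
--     check = []
--
--     if new[0].isupper():
--         for i in range(0, len(new)):
--             if i % 2 == 0 and new[i].isupper():
--                 check.append(new[i])
--             elif i % 2 != 0 and new[i].islower():
--                 check.append(new[i])
--
--     if new[0].islower():
--         for i in range(0, len(new)):
--             if i % 2 != 0 and new[i].isupper():
--                 check.append(new[i])
--             elif i % 2 == 0 and new[i].islower():
--                 check.append(new[i])
--
--     return True if new == check else False
-- ===== SOURCE B (Python) =====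
-- def is_spongecase(s):
--     first = s[0]
--     if first.isupper():
--         want_upper = True
--     elif first.islower():
--         want_upper = False
--     else:
--         return False
--     for c in s:
--         if not (c.isupper() if want_upper else c.islower()):
--             return False
--         want_upper = not want_upper
--     return True
-- ===== Notes on version B (the rewrite author's own statement) =====
-- stated objective: simpler
-- what changed: A builds a filtered copy of the string (appending each character whose case matches its index parity) and compares that list with the original; B makes a single early-exit scan with a toggling want_upper flag and builds no list.
-- outside the precondition, e.g. on is_spongecase(''): A raises IndexError, B raises IndexError
import Mathlib
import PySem

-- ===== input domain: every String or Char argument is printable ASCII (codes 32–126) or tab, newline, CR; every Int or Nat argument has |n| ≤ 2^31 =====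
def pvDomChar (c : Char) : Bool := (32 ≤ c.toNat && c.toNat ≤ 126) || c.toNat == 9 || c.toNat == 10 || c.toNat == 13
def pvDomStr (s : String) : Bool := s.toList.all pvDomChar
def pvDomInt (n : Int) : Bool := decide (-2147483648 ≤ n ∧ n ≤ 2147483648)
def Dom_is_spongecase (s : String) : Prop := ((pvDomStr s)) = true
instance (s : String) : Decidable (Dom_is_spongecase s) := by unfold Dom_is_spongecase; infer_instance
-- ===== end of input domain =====

-- B replaces A's build-a-filtered-copy-and-compare with a single early-exit scan that
-- toggles a want_upper flag (objective: simpler; no auxiliary list is built).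

-- ===== PORT A =====
def is_spongecase (s : String) : Bool :=
  let new := s.toList
  let check : List Char := []
  let check :=
    if PySem.Chars.isupper (PySem.List.pyGetD new 0 ' ') then
      (PySem.List.pyRange 0 (PySem.List.len new) 1).foldl (fun check i =>
        if PySem.Int.mod i 2 == 0 && PySem.Chars.isupper (PySem.List.pyGetD new i ' ') then
          check ++ [PySem.List.pyGetD new i ' ']
        else if PySem.Int.mod i 2 != 0 && PySem.Chars.islower (PySem.List.pyGetD new i ' ') then
          check ++ [PySem.List.pyGetD new i ' ']
        else check) check
    else check
  let check :=
    if PySem.Chars.islower (PySem.List.pyGetD new 0 ' ') then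
      (PySem.List.pyRange 0 (PySem.List.len new) 1).foldl (fun check i =>
        if PySem.Int.mod i 2 != 0 && PySem.Chars.isupper (PySem.List.pyGetD new i ' ') then
          check ++ [PySem.List.pyGetD new i ' ']
        else if PySem.Int.mod i 2 == 0 && PySem.Chars.islower (PySem.List.pyGetD new i ' ') then
          check ++ [PySem.List.pyGetD new i ' ']
        else check) check
    else check
  if new == check then true else false

-- ===== PORT B =====
-- the for-loop of Source B: the early `return False` becomes the `false` branch, the flag toggles
def pvSpongeLoop (want_upper : Bool) : List Char → Bool
  | [] => true
  | c :: t =>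
    if !(if want_upper then PySem.Chars.isupper c else PySem.Chars.islower c) then false
    else pvSpongeLoop (!want_upper) t

def is_spongecase_alt (s : String) : Bool :=
  match PySem.List.pyGet? s.toList 0 with
  | none => false          -- s[0] raises IndexError in Python; outside Pre_
  | some first =>
    if PySem.Chars.isupper first then pvSpongeLoop true s.toList
    else if PySem.Chars.islower first then pvSpongeLoop false s.toList
    else false

-- ===== PRECONDITION & SPEC =====
-- Pre_ excludes only the empty string, on which A raises IndexError at new[0] (B's s[0] raises too).
def Pre_is_spongecase (s : String) : Prop := s.toList ≠ []
instance (s : String) : Decidable (Pre_is_spongecase s) := by unfold Pre_is_spongecase; infer_instance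
def pvWitness_is_spongecase : String := "SpOnGe"

def Spec_is_spongecase (s : String) (out : Bool) : Prop := out = is_spongecase_alt s
instance (s : String) (out : Bool) : Decidable (Spec_is_spongecase s out) := by unfold Spec_is_spongecase; infer_instance

-- ===== CLAIM (what is proved, stated in full; the proofs are below) =====
def Claim_equal_is_spongecase : Prop := ∀ (s : String), Dom_is_spongecase s → Pre_is_spongecase s → Spec_is_spongecase s (is_spongecase s)

-- ===== LEMMAS AND PROOFS =====

-- a char is never both upper- and lowercase
theorem pv_not_upper_and_lower (c : Char) (h : PySem.Chars.isupper c = true) :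
    PySem.Chars.islower c = false := by
  simp only [PySem.Chars.isupper, Bool.and_eq_true, decide_eq_true_eq] at h
  simp only [PySem.Chars.islower]
  have : ¬ ('a' ≤ c) := fun hc => absurd (le_trans hc h.2) (by decide)
  simp [this]

-- parity of s+1 is the flip of the parity of s
theorem pv_mod_succ_flip (s : Int) :
    decide (PySem.Int.mod (s + 1) 2 = 0) = !decide (PySem.Int.mod s 2 = 0) := by
  have h1 : PySem.Int.mod (s + 1) 2 = (s + 1) % 2 := PySem.Int.mod_eq_emod_of_pos (by omega)
  have h2 : PySem.Int.mod s 2 = s % 2 := PySem.Int.mod_eq_emod_of_pos (by omega)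
  rw [h1, h2]
  by_cases h : s % 2 = 0
  · have h' : (s + 1) % 2 = 1 := by omega
    simp [h, h']
  · have h' : (s + 1) % 2 = 0 := by omega
    have h'' : s % 2 = 1 := by omega
    simp [h', h'']

-- unfolding one step of enumerate
theorem pv_enumerate_cons (a : Char) (t : List Char) (s : Int) :
    PySem.List.enumerate (a :: t) s = (s, a) :: PySem.List.enumerate t (s + 1) := by
  simp [PySem.List.enumerate]

-- A's filtered-copy loop, in generic shape: it appends xs[i] exactly at the indices where P or Q holds
theorem pv_check_shape (P Q : Int → Char → Bool) (xs : List Char) :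
    (PySem.List.pyRange 0 (PySem.List.len xs) 1).foldl (fun check i =>
        if P i (PySem.List.pyGetD xs i ' ') then check ++ [PySem.List.pyGetD xs i ' ']
        else if Q i (PySem.List.pyGetD xs i ' ') then check ++ [PySem.List.pyGetD xs i ' ']
        else check) []
    = List.map (fun p => p.2)
        (List.filter (fun p => P p.1 p.2 || Q p.1 p.2) (PySem.List.enumerate xs 0)) := by
  have h1 : (PySem.List.pyRange 0 (PySem.List.len xs) 1).foldl (fun check i =>
        if P i (PySem.List.pyGetD xs i ' ') then check ++ [PySem.List.pyGetD xs i ' ']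
        else if Q i (PySem.List.pyGetD xs i ' ') then check ++ [PySem.List.pyGetD xs i ' ']
        else check) []
      = ((PySem.List.pyRange 0 (PySem.List.len xs) 1).map
          (fun j => (j, PySem.List.pyGetD xs j ' '))).foldl
          (fun check (p : Int × Char) =>
            if P p.1 p.2 || Q p.1 p.2 then check ++ [p.2] else check) [] := by
    rw [List.foldl_map]
    congr 1
    funext check i
    by_cases hP : P i (PySem.List.pyGetD xs i ' ') = true <;>
      by_cases hQ : Q i (PySem.List.pyGetD xs i ' ') = true <;> simp [hP, hQ]
  rw [h1, ← PySem.List.enumerate_eq_map_pyRange xs ' ',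
      PySem.List.foldl_append_if (fun p => P p.1 p.2 || Q p.1 p.2) (fun (p : Int × Char) => p.2)
        (PySem.List.enumerate xs 0) []]
  simp

-- a list equals the filtered copy of itself iff the filter keeps every position
theorem pv_eq_filter_iff (P : Int × Char → Bool) (l : List Char) (s : Int) :
    (l = List.map (fun p => p.2) (List.filter P (PySem.List.enumerate l s)))
      ↔ ∀ p ∈ PySem.List.enumerate l s, P p = true := by
  constructor
  · intro h
    have h2 : (PySem.List.enumerate l s).length = l.length := by
      have hm := congrArg List.length (PySem.List.map_snd_enumerate l s)
      simp only [List.length_map] at hm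
      exact hm
    have h1 := congrArg List.length h
    simp only [List.length_map] at h1
    have hlen : (List.filter P (PySem.List.enumerate l s)).length
        = (PySem.List.enumerate l s).length := by omega
    have := (List.filter_sublist (l := PySem.List.enumerate l s) (p := P)).eq_of_length hlen
    exact List.filter_eq_self.mp this
  · intro h
    rw [List.filter_eq_self.mpr h, PySem.List.map_snd_enumerate]

-- B's loop started on the parity of s checks upper at even indices, lower at odd ones
theorem pv_loop_up (l : List Char) : ∀ s : Int,
    pvSpongeLoop (decide (PySem.Int.mod s 2 = 0)) l = true
      ↔ ∀ p ∈ PySem.List.enumerate l s,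
          (if PySem.Int.mod p.1 2 = 0 then PySem.Chars.isupper p.2
           else PySem.Chars.islower p.2) = true := by
  induction l with
  | nil => intro s; simp [pvSpongeLoop, PySem.List.enumerate]
  | cons a t ih =>
    intro s
    rw [pvSpongeLoop, ← pv_mod_succ_flip s, pv_enumerate_cons, List.forall_mem_cons,
       ← ih (s + 1)]
    by_cases ha : PySem.Chars.isupper a = true <;>
      by_cases hb : PySem.Chars.islower a = true <;>
      simp [ha, hb]

-- B's loop started on the opposite parity checks lower at even indices, upper at odd ones
theorem pv_loop_down (l : List Char) : ∀ s : Int,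
    pvSpongeLoop (!decide (PySem.Int.mod s 2 = 0)) l = true
      ↔ ∀ p ∈ PySem.List.enumerate l s,
          (if PySem.Int.mod p.1 2 = 0 then PySem.Chars.islower p.2
           else PySem.Chars.isupper p.2) = true := by
  induction l with
  | nil => intro s; simp [pvSpongeLoop, PySem.List.enumerate]
  | cons a t ih =>
    intro s
    have harg : (!!decide (PySem.Int.mod s 2 = 0)) = (!decide (PySem.Int.mod (s + 1) 2 = 0)) := by
      rw [pv_mod_succ_flip s]
    rw [pvSpongeLoop, harg, pv_enumerate_cons, List.forall_mem_cons, ← ih (s + 1)]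
    by_cases ha : PySem.Chars.isupper a = true <;>
      by_cases hb : PySem.Chars.islower a = true <;>
      simp [ha, hb]

-- Python's `True if b else False` is b
theorem pv_if_true_false (b : Bool) : (if b then true else false) = b := by cases b <;> rfl

-- the upper-start branch: "l equals its filtered copy" is B's toggling scan from want_upper = True
theorem pv_branch_up (l : List Char) :
    (l == List.map (fun p => p.2)
        (List.filter (fun p => (PySem.Int.mod p.1 2 == 0 && PySem.Chars.isupper p.2)
            || (PySem.Int.mod p.1 2 != 0 && PySem.Chars.islower p.2))
          (PySem.List.enumerate l 0)))
      = pvSpongeLoop true l := by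
  rw [Bool.eq_iff_iff, beq_iff_eq, pv_eq_filter_iff]
  have hl0 := pv_loop_up l 0
  rw [show decide (PySem.Int.mod (0 : Int) 2 = 0) = true by decide] at hl0
  rw [hl0]
  apply forall_congr'
  intro p
  apply imp_congr_right
  intro _
  by_cases h : p.1 % 2 = 0
  · simp [h]
  · have h1 : p.1 % 2 = 1 := by omega
    simp [h1]

-- the lower-start branch: the mirrored filter is B's toggling scan from want_upper = False
theorem pv_branch_down (l : List Char) :
    (l == List.map (fun p => p.2)
        (List.filter (fun p => (PySem.Int.mod p.1 2 != 0 && PySem.Chars.isupper p.2)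
            || (PySem.Int.mod p.1 2 == 0 && PySem.Chars.islower p.2))
          (PySem.List.enumerate l 0)))
      = pvSpongeLoop false l := by
  rw [Bool.eq_iff_iff, beq_iff_eq, pv_eq_filter_iff]
  have hl0 := pv_loop_down l 0
  rw [show (!decide (PySem.Int.mod (0 : Int) 2 = 0)) = false by decide] at hl0
  rw [hl0]
  apply forall_congr'
  intro p
  apply imp_congr_right
  intro _
  by_cases h : p.1 % 2 = 0
  · simp [h]
  · have h1 : p.1 % 2 = 1 := by omega
    simp [h1]

-- ===== VERDICT (by name: the statement is the Claim_ definition above) =====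
theorem is_spongecase_spec : Claim_equal_is_spongecase := by
  intro s _ hpre
  unfold Spec_is_spongecase is_spongecase is_spongecase_alt
  cases hl : s.toList with
  | nil => exact absurd hl hpre
  | cons c t =>
    simp only [PySem.List.pyGetD_zero_cons, PySem.List.pyGet?_zero_cons]
    by_cases hU : PySem.Chars.isupper c = true
    · have hL := pv_not_upper_and_lower c hU
      simp only [hU, hL, if_true, Bool.false_eq_true, if_false]
      rw [pv_check_shape (fun i ch => PySem.Int.mod i 2 == 0 && PySem.Chars.isupper ch)
            (fun i ch => PySem.Int.mod i 2 != 0 && PySem.Chars.islower ch) (c :: t)]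
      rw [← pv_branch_up (c :: t)]
      exact pv_if_true_false _
    · by_cases hLo : PySem.Chars.islower c = true
      · simp only [hU, hLo, Bool.false_eq_true, if_false, if_true]
        rw [pv_check_shape (fun i ch => PySem.Int.mod i 2 != 0 && PySem.Chars.isupper ch)
              (fun i ch => PySem.Int.mod i 2 == 0 && PySem.Chars.islower ch) (c :: t)]
        rw [← pv_branch_down (c :: t)]
        exact pv_if_true_false _
      · simp [hU, hLo]
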